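-- pv_equiv track=rewrite | github.com/cadenclaussen/tictactoe-old3 | tictactoe.py | determinespot
-- ===== SOURCE A (Python) =====
-- def determinespot(place):
--   numbers = [1, 2, 3, 4, 5, 6, 7, 8, 9]
--   for number in numbers:
--     if number == place:
--       if number == 1:
--         return [0, 0]
--       if number == 2:
--         return [0, 1]
--       if number == 3:
--         return [0, 2]
--       if number == 4:
--         return [1, 0]
--       if number == 5:
--         return [1, 1]
--       if number == 6:
--         return [1, 2]
--       if number == 7:
--         return [2, 0]
--       if number == 8:
--         return [2, 1]
--       if number == 9:
--         return [2, 2]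
-- ===== SOURCE B (Python) =====
-- def determinespot(place):
--     # Arithmetic: places 1..9 map to (row, col) = divmod(place-1, 3); others fall through to None.
--     if 1 <= place <= 9:
--         row, col = divmod(int(place) - 1, 3)
--         return [row, col]
-- ===== Notes on version B (the rewrite author's own statement) =====
-- stated objective: simpler
-- what changed: Replaces the 9-way scan-and-branch lookup with a range guard plus a divmod closed form (row, col) = divmod(place-1, 3).
import Mathlib
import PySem

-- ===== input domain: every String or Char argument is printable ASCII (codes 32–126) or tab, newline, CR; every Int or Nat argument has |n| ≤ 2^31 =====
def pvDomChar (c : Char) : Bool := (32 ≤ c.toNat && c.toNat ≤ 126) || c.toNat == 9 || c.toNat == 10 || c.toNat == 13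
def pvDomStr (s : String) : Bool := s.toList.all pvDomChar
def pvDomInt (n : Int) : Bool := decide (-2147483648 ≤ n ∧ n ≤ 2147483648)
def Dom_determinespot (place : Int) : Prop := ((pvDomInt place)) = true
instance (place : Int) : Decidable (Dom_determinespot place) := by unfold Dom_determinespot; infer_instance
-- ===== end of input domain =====

-- B replaces A's 9-branch scan with a range guard and a divmod closed form (simpler).


-- ===== PORT A =====
-- A-side: the literal for-loop over [1..9] with the chained equality branches
def determinespotLoop (place : Int) : List Int → Option (List Int)
  | [] => none
  | number :: rest =>
    if number == place then
      if number == 1 then some [0, 0]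
      else if number == 2 then some [0, 1]
      else if number == 3 then some [0, 2]
      else if number == 4 then some [1, 0]
      else if number == 5 then some [1, 1]
      else if number == 6 then some [1, 2]
      else if number == 7 then some [2, 0]
      else if number == 8 then some [2, 1]
      else if number == 9 then some [2, 2]
      else determinespotLoop place rest
    else determinespotLoop place rest

def determinespot (place : Int) : Option (List Int) :=
  determinespotLoop place [1, 2, 3, 4, 5, 6, 7, 8, 9]

-- ===== PORT B =====
-- B: range guard + closed-form divmod (Python // and % via PySem.Int)
def determinespot_alt (place : Int) : Option (List Int) :=
  if 1 ≤ place ∧ place ≤ 9 then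
    some [PySem.Int.floordiv (place - 1) 3, PySem.Int.mod (place - 1) 3]
  else none

-- ===== PRECONDITION & SPEC =====
def Spec_determinespot (place : Int) (out : Option (List Int)) : Prop := out = determinespot_alt place
instance (place : Int) (out : Option (List Int)) : Decidable (Spec_determinespot place out) := by unfold Spec_determinespot; infer_instance

-- ===== CLAIM (what is proved, stated in full; the proofs are below) =====
def Claim_equal_determinespot : Prop := ∀ (place : Int), Dom_determinespot place → Spec_determinespot place (determinespot place)

-- ===== LEMMAS AND PROOFS =====
theorem determinespotLoop_none (place : Int) (l : List Int)
    (h : ∀ n ∈ l, n ≠ place) : determinespotLoop place l = none := by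
  induction l with
  | nil => rfl
  | cons n rest ih =>
    rw [determinespotLoop]
    rw [if_neg (by simpa using h n (List.mem_cons_self ..))]
    exact ih fun m hm => h m (List.mem_cons_of_mem _ hm)

-- ===== VERDICT (by name: the statement is the Claim_ definition above) =====
theorem determinespot_spec : Claim_equal_determinespot := by
  intro place _
  unfold Spec_determinespot determinespot determinespot_alt
  by_cases h : 1 ≤ place ∧ place ≤ 9
  · obtain ⟨h1, h2⟩ := h
    interval_cases place <;> decide
  · rw [if_neg h, determinespotLoop_none]
    intro n hn
    simp only [List.mem_cons, List.not_mem_nil, or_false] at hn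
    omega
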